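-- pv_equiv track=rewrite | github.com/aws-samples/sample-suricata-generator | src/importers/palo_alto_importer.py | _get_conversion_status
-- ===== SOURCE A (Python) =====
-- def _get_conversion_status(rule_notes):
--     """Determine conversion status from a rule's notes.
--
--     Returns: 'full', 'partial', or 'none'
--     """
--     has_error = False
--     has_warning = False
--
--     for note in rule_notes:
--         note_lower = note.lower() if isinstance(note, str) else ''
--         if 'no suricata equivalent' in note_lower or 'commented out' in note_lower:
--             has_error = True
--         elif ('warning' in note_lower or 'verify' in note_lower or
--               'review' in note_lower or 'needs manual' in note_lower):
--             has_warning = True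
--
--     if has_error:
--         return 'none'
--     elif has_warning:
--         return 'partial'
--     return 'full'
-- ===== SOURCE B (Python) =====
-- def _get_conversion_status(rule_notes):
--     """Determine conversion status from a rule's notes.
--
--     Returns: 'full', 'partial', or 'none'
--     """
--     # Concatenate all notes (lowercased; non-strings as '') into one blob,
--     # separated by '\n', which occurs in no keyword, so a keyword matches the
--     # blob iff it matches some individual note.
--     text = '\n'.join(
--         note.lower() if isinstance(note, str) else '' for note in rule_notes)
--     if 'no suricata equivalent' in text or 'commented out' in text:
--         return 'none'
--     if ('warning' in text or 'verify' in text or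
--             'review' in text or 'needs manual' in text):
--         return 'partial'
--     return 'full'
-- ===== Notes on version B (the rewrite author's own statement) =====
-- stated objective: alternative
-- what changed: Instead of scanning notes one by one with two mutable flags, B joins all lowercased notes into a single '\n'-separated blob and runs each keyword search once over the blob ('\n' occurs in no keyword, so blob matches coincide with per-note matches), returning at the first matching severity.
import Mathlib
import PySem

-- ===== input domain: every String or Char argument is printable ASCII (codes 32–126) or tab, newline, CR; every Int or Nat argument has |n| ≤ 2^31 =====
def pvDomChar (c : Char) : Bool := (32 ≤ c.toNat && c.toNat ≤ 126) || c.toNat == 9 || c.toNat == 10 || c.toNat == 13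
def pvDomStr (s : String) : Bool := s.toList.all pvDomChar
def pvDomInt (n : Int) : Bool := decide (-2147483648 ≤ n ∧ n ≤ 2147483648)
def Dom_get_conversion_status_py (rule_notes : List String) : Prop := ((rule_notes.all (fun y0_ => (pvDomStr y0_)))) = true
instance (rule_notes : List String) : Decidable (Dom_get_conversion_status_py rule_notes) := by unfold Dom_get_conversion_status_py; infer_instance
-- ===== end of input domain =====

-- B joins all lowercased notes into one '\n'-separated blob and searches each keyword once over the blob instead of scanning notes with two boolean flags (objective: alternative).


-- ===== PORT A =====
-- literal port of A: one pass keeping (has_error, has_warning), then the if/elif chain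
def get_conversion_status_py (rule_notes : List String) : String :=
  let st := rule_notes.foldl
    (fun (st : Bool × Bool) note =>
      let note_lower := PySem.Str.lower note
      if PySem.Str.isIn "no suricata equivalent" note_lower ||
         PySem.Str.isIn "commented out" note_lower then
        (true, st.2)
      else if PySem.Str.isIn "warning" note_lower || PySem.Str.isIn "verify" note_lower ||
              PySem.Str.isIn "review" note_lower || PySem.Str.isIn "needs manual" note_lower then
        (st.1, true)
      else st)
    (false, false)
  if st.1 then "none" else if st.2 then "partial" else "full"

-- ===== PORT B =====
-- literal port of B: join the lowercased notes with '\n' and search the keywords in the blob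
def get_conversion_status_py_alt (rule_notes : List String) : String :=
  let text := PySem.Str.join "\n" (rule_notes.map PySem.Str.lower)
  if PySem.Str.isIn "no suricata equivalent" text || PySem.Str.isIn "commented out" text then
    "none"
  else if PySem.Str.isIn "warning" text || PySem.Str.isIn "verify" text ||
          PySem.Str.isIn "review" text || PySem.Str.isIn "needs manual" text then
    "partial"
  else "full"

-- ===== PRECONDITION & SPEC =====
def Spec_get_conversion_status_py (rule_notes : List String) (out : String) : Prop := out = get_conversion_status_py_alt rule_notes
instance (rule_notes : List String) (out : String) : Decidable (Spec_get_conversion_status_py rule_notes out) := by unfold Spec_get_conversion_status_py; infer_instance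

-- ===== CLAIM (what is proved, stated in full; the proofs are below) =====
def Claim_equal_get_conversion_status_py : Prop := ∀ (rule_notes : List String), Dom_get_conversion_status_py rule_notes → Spec_get_conversion_status_py rule_notes (get_conversion_status_py rule_notes)

-- ===== LEMMAS AND PROOFS =====

-- a keyword not containing the separator is an infix of xs ++ sep :: ys iff it is an infix of xs or of ys
theorem pvInfix_append_cons {kw : List Char} {sep : Char} (hne : kw ≠ []) (hsep : sep ∉ kw)
    (xs ys : List Char) : kw <:+: (xs ++ sep :: ys) ↔ kw <:+: xs ∨ kw <:+: ys := by
  induction xs with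
  | nil =>
    simp only [List.nil_append]
    constructor
    · intro h
      rcases List.infix_cons_iff.mp h with hp | hi
      · cases kw with
        | nil => exact absurd rfl hne
        | cons c k =>
          have h0 : c = sep := by
            have := hp.getElem (i := 0) (by simp)
            simpa using this
          exact absurd (h0 ▸ List.mem_cons_self) hsep
      · exact Or.inr hi
    · rintro (h | h)
      · rw [List.infix_nil] at h; exact absurd h hne
      · exact h.trans (List.infix_cons (List.infix_refl ys))
  | cons x xs ih =>
    rw [List.cons_append, List.infix_cons_iff, ih, List.infix_cons_iff]
    constructor
    · rintro (hp | h | h)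
      · by_cases hlen : kw.length ≤ (x :: xs).length
        · left; left
          rw [List.prefix_iff_eq_take] at hp ⊢
          rwa [show x :: (xs ++ sep :: ys) = (x :: xs) ++ sep :: ys from rfl,
            List.take_append_of_le_length hlen] at hp
        · exfalso
          have hidx : (x :: xs).length < kw.length := by omega
          have h1 : (x :: xs) ++ [sep] <+: x :: (xs ++ sep :: ys) :=
            ⟨ys, by simp⟩
          have h2 : (x :: xs) ++ [sep] <+: kw :=
            List.prefix_of_prefix_length_le h1 hp (by simp at hidx ⊢; omega)
          exact hsep (h2.subset (by simp))
      · left; right; exact h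
      · right; exact h
    · rintro ((hp | hi) | h)
      · left
        exact hp.trans (List.prefix_append (x :: xs) (sep :: ys))
      · right; left; exact hi
      · right; right; exact h

-- keyword search over the '\n'-joined blob = search in some part
theorem pvIsIn_join (kw : List Char) (hne : kw ≠ []) (hsep : Char.ofNat 10 ∉ kw)
    (ps : List (List Char)) :
    PySem.Chars.isIn kw (PySem.Chars.join [Char.ofNat 10] ps)
      = ps.any (fun p => PySem.Chars.isIn kw p) := by
  induction ps with
  | nil =>
    rw [PySem.Chars.join_nil, List.any_nil, PySem.Chars.isIn_eq_false_iff, List.infix_nil]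
    exact hne
  | cons p rest ih =>
    cases rest with
    | nil =>
      rw [PySem.Chars.join_singleton]
      simp
    | cons q rs =>
      rw [PySem.Chars.join_cons_cons, List.any_cons, ← ih,
        List.append_assoc, List.singleton_append]
      rw [Bool.eq_iff_iff]
      simp only [Bool.or_eq_true, PySem.Chars.isIn_iff_infix]
      exact pvInfix_append_cons hne hsep p (PySem.Chars.join [Char.ofNat 10] (q :: rs))

-- lift to strings: a '\n'-free nonempty keyword is in the joined lowered blob iff it is in some lowered note
theorem pvIsIn_blob (kw : String) (hne : kw.toList ≠ []) (hsep : Char.ofNat 10 ∉ kw.toList)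
    (notes : List String) :
    PySem.Str.isIn kw (PySem.Str.join "\n" (notes.map PySem.Str.lower))
      = notes.any (fun n => PySem.Str.isIn kw (PySem.Str.lower n)) := by
  rw [PySem.Str.isIn_eq, PySem.Str.toList_join,
    show ("\n" : String).toList = [Char.ofNat 10] from rfl,
    pvIsIn_join kw.toList hne hsep, List.map_map, List.any_map]
  simp [Function.comp_def]

-- A's per-note conditions, named
def pvErrCond (note : String) : Bool :=
  PySem.Str.isIn "no suricata equivalent" (PySem.Str.lower note) ||
  PySem.Str.isIn "commented out" (PySem.Str.lower note)

def pvWarnCond (note : String) : Bool :=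
  PySem.Str.isIn "warning" (PySem.Str.lower note) || PySem.Str.isIn "verify" (PySem.Str.lower note) ||
  PySem.Str.isIn "review" (PySem.Str.lower note) || PySem.Str.isIn "needs manual" (PySem.Str.lower note)

-- A's fold step as a function
def pvStepA (st : Bool × Bool) (note : String) : Bool × Bool :=
  let note_lower := PySem.Str.lower note
  if PySem.Str.isIn "no suricata equivalent" note_lower ||
     PySem.Str.isIn "commented out" note_lower then
    (true, st.2)
  else if PySem.Str.isIn "warning" note_lower || PySem.Str.isIn "verify" note_lower ||
          PySem.Str.isIn "review" note_lower || PySem.Str.isIn "needs manual" note_lower then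
    (st.1, true)
  else st

theorem pvStepA_eq (st : Bool × Bool) (n : String) :
    pvStepA st n = if pvErrCond n then (true, st.2) else if pvWarnCond n then (st.1, true) else st := rfl

-- notes that reach the elif and warn: not an error note, but a warning note
def pvWarnErrCond (note : String) : Bool := !pvErrCond note && pvWarnCond note

-- A's fold computes the two any's (the elif skips error notes)
theorem pvFoldA_char (l : List String) (a b : Bool) :
    l.foldl pvStepA (a, b) = (a || l.any pvErrCond, b || l.any pvWarnErrCond) := by
  induction l generalizing a b with
  | nil => simp
  | cons x t ih =>
    rw [List.foldl_cons, pvStepA_eq, List.any_cons, List.any_cons]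
    cases hE : pvErrCond x <;> cases hW : pvWarnCond x <;> simp [ih, pvWarnErrCond, hE, hW]

-- any distributes over ||
theorem pvAny_or (l : List String) (p q : String → Bool) :
    l.any (fun n => p n || q n) = (l.any p || l.any q) := by
  rw [Bool.eq_iff_iff]
  simp only [List.any_eq_true, Bool.or_eq_true]
  constructor
  · rintro ⟨n, hn, h | h⟩
    · exact Or.inl ⟨n, hn, h⟩
    · exact Or.inr ⟨n, hn, h⟩
  · rintro (⟨n, hn, h⟩ | ⟨n, hn, h⟩)
    · exact ⟨n, hn, Or.inl h⟩
    · exact ⟨n, hn, Or.inr h⟩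

-- ===== VERDICT (by name: the statement is the Claim_ definition above) =====
theorem get_conversion_status_py_spec : Claim_equal_get_conversion_status_py := by
  intro l _
  unfold Spec_get_conversion_status_py
  have hA : get_conversion_status_py l
      = (if l.any pvErrCond then "none"
         else if l.any pvWarnErrCond then "partial" else "full") := by
    show (if (l.foldl pvStepA (false, false)).1 then "none"
          else if (l.foldl pvStepA (false, false)).2 then "partial" else "full") = _
    rw [pvFoldA_char]
    simp
  have hB : get_conversion_status_py_alt l
      = (if PySem.Str.isIn "no suricata equivalent" (PySem.Str.join "\n" (l.map PySem.Str.lower)) ||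
            PySem.Str.isIn "commented out" (PySem.Str.join "\n" (l.map PySem.Str.lower)) then "none"
         else if PySem.Str.isIn "warning" (PySem.Str.join "\n" (l.map PySem.Str.lower)) ||
                 PySem.Str.isIn "verify" (PySem.Str.join "\n" (l.map PySem.Str.lower)) ||
                 PySem.Str.isIn "review" (PySem.Str.join "\n" (l.map PySem.Str.lower)) ||
                 PySem.Str.isIn "needs manual" (PySem.Str.join "\n" (l.map PySem.Str.lower)) then "partial"
         else "full") := rfl
  have e1 : l.any pvErrCond
      = (l.any (fun n => PySem.Str.isIn "no suricata equivalent" (PySem.Str.lower n)) ||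
         l.any (fun n => PySem.Str.isIn "commented out" (PySem.Str.lower n))) := by
    have h0 : l.any pvErrCond
        = l.any (fun n => PySem.Str.isIn "no suricata equivalent" (PySem.Str.lower n) ||
            PySem.Str.isIn "commented out" (PySem.Str.lower n)) := rfl
    rw [h0, pvAny_or]
  have ew : l.any pvWarnCond
      = (l.any (fun n => PySem.Str.isIn "warning" (PySem.Str.lower n)) ||
         l.any (fun n => PySem.Str.isIn "verify" (PySem.Str.lower n)) ||
         l.any (fun n => PySem.Str.isIn "review" (PySem.Str.lower n)) ||
         l.any (fun n => PySem.Str.isIn "needs manual" (PySem.Str.lower n))) := by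
    have h0 : l.any pvWarnCond
        = l.any (fun n => ((PySem.Str.isIn "warning" (PySem.Str.lower n) ||
            PySem.Str.isIn "verify" (PySem.Str.lower n)) ||
             PySem.Str.isIn "review" (PySem.Str.lower n)) ||
              PySem.Str.isIn "needs manual" (PySem.Str.lower n)) := rfl
    rw [h0, pvAny_or, pvAny_or, pvAny_or]
  have hwe : l.any pvErrCond = false → l.any pvWarnErrCond = l.any pvWarnCond := by
    intro h
    rw [List.any_eq_false] at h
    rw [Bool.eq_iff_iff]
    simp only [List.any_eq_true, pvWarnErrCond, Bool.and_eq_true, Bool.not_eq_true']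
    constructor
    · rintro ⟨n, hn, _, hwn⟩; exact ⟨n, hn, hwn⟩
    · rintro ⟨n, hn, hwn⟩
      refine ⟨n, hn, ?_, hwn⟩
      simpa using h n hn
  rw [hA, hB,
    pvIsIn_blob "no suricata equivalent" (by decide) (by decide) l,
    pvIsIn_blob "commented out" (by decide) (by decide) l,
    pvIsIn_blob "warning" (by decide) (by decide) l,
    pvIsIn_blob "verify" (by decide) (by decide) l,
    pvIsIn_blob "review" (by decide) (by decide) l,
    pvIsIn_blob "needs manual" (by decide) (by decide) l,
    ← e1, ← ew]
  cases h : l.any pvErrCond with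
  | true => simp
  | false => simp [hwe h]
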